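-- pv_equiv track=rewrite | github.com/SaipakhooHooia/project | test_calender.py | split_dates_by_month
-- ===== SOURCE A (Python) =====
-- def split_dates_by_month(dates):
--   """
--   將包含跨越月份日期的列表分割成多個子列表。
--
--   Args:
--     dates: 包含日期的列表。
--
--   Returns:
--     list: 包含多個子列表的列表，每個子列表代表一個月份的日期。
--   """
--
--   result = []
--   current_month_dates = []
--
--   for date in dates:
--     if not current_month_dates or date >= current_month_dates[-1]:
--       current_month_dates.append(date)
--     else:
--       result.append(current_month_dates)
--       current_month_dates = [date]
--
--   if current_month_dates:
--     result.append(current_month_dates)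
--
--   return result
-- ===== SOURCE B (Python) =====
-- def split_dates_by_month(dates):
--   """
--   將包含跨越月份日期的列表分割成多個子列表。
--
--   Args:
--     dates: 包含日期的列表。
--
--   Returns:
--     list: 包含多個子列表的列表，每個子列表代表一個月份的日期。
--   """
--   if not dates:
--     return []
--   breaks = [i for i in range(1, len(dates)) if dates[i] < dates[i - 1]]
--   bounds = [0] + breaks + [len(dates)]
--   return [dates[s:e] for s, e in zip(bounds, bounds[1:])]
-- ===== Notes on version B (the rewrite author's own statement) =====
-- stated objective: alternative
-- what changed: A grows the current run inline and flushes it at each descent and at the end; B first collects the boundary indices where dates[i] < dates[i-1] in one pass and then builds the groups as slices between consecutive boundaries.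
import Mathlib
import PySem

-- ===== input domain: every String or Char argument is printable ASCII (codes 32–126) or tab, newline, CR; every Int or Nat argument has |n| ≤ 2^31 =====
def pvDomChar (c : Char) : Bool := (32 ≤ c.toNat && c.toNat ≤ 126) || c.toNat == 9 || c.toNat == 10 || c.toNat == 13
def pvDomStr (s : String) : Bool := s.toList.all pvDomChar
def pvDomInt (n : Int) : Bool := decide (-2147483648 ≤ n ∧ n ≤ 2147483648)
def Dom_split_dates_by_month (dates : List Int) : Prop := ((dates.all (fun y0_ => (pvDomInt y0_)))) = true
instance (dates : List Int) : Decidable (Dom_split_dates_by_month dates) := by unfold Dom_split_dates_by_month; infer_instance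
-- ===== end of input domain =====

-- B replaces A's inline group-growing loop with a boundary-index pass followed by a slicing pass (alternative decomposition, same cost).

-- ===== PORT A =====
-- A-side helpers: the loop body and the final flush of A's loop.
def stepF (st : List (List Int) × List Int) (date : Int) : List (List Int) × List Int :=
  if st.2.isEmpty || decide (PySem.List.pyGetD st.2 (-1) 0 ≤ date) then
    (st.1, st.2 ++ [date])
  else
    (st.1 ++ [st.2], [date])

def finalize (st : List (List Int) × List Int) : List (List Int) :=
  if st.2.isEmpty then st.1 else st.1 ++ [st.2]

def split_dates_by_month (dates : List Int) : List (List Int) :=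
  finalize (dates.foldl stepF ([], []))

-- ===== PORT B =====
def split_dates_by_month_alt (dates : List Int) : List (List Int) :=
  if dates.isEmpty then []
  else
    let n : Int := PySem.List.len dates
    let breaks : List Int := (PySem.List.pyRange 1 n).filter
      (fun i => decide (PySem.List.pyGetD dates i 0 < PySem.List.pyGetD dates (i - 1) 0))
    let bounds : List Int := 0 :: (breaks ++ [n])
    (bounds.zip bounds.tail).map (fun se => PySem.List.slice dates (some se.1) (some se.2))

-- ===== PRECONDITION & SPEC =====
def Spec_split_dates_by_month (dates : List Int) (out : List (List Int)) : Prop := out = split_dates_by_month_alt dates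
instance (dates : List Int) (out : List (List Int)) : Decidable (Spec_split_dates_by_month dates out) := by unfold Spec_split_dates_by_month; infer_instance

-- ===== CLAIM (what is proved, stated in full; the proofs are below) =====
def Claim_equal_split_dates_by_month : Prop := ∀ (dates : List Int), Dom_split_dates_by_month dates → Spec_split_dates_by_month dates (split_dates_by_month dates)

-- ===== LEMMAS AND PROOFS =====

-- Reference recursion: maximal nondecreasing runs, built back-to-front.
def chopAux (d r : Int) : List (List Int) → List (List Int)
  | [] => [[d]]
  | g :: gs => if r < d then [d] :: g :: gs else (d :: g) :: gs

def chop : List Int → List (List Int)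
  | [] => []
  | [d] => [[d]]
  | d :: r :: rs => chopAux d r (chop (r :: rs))

lemma chop_cons_ne_nil (d : Int) (l : List Int) : chop (d :: l) ≠ [] := by
  cases l with
  | nil => simp [chop]
  | cons r rs =>
    simp only [chop]
    cases hc : chop (r :: rs) with
    | nil => simp [chopAux]
    | cons g gs => simp only [chopAux]; split <;> simp

lemma stepF_app (res : List (List Int)) (pre : List Int) (x d : Int) :
    stepF (res, pre ++ [x]) d =
      if x ≤ d then (res, (pre ++ [x]) ++ [d]) else (res ++ [pre ++ [x]], [d]) := by
  unfold stepF
  simp [PySem.List.pyGetD_neg_one_append_singleton]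

lemma fold_shift : ∀ (l : List Int) (res : List (List Int)) (cur : List Int),
    finalize (l.foldl stepF (res, cur)) = res ++ finalize (l.foldl stepF ([], cur)) := by
  intro l
  induction l with
  | nil => intro res cur; cases cur <;> simp [finalize]
  | cons d t ih =>
    intro res cur
    rw [List.foldl_cons, List.foldl_cons]
    by_cases hcond : (cur.isEmpty || decide (PySem.List.pyGetD cur (-1) 0 ≤ d)) = true
    · simp only [stepF, hcond, if_true]
      exact ih res _
    · simp only [stepF, hcond, Bool.false_eq_true, if_false]
      rw [ih (res ++ [cur]), ih ([] ++ [cur])]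
      simp

lemma fold_chop : ∀ (l : List Int) (pre : List Int) (x : Int),
    finalize (l.foldl stepF ([], pre ++ [x])) =
      (pre ++ (chop (x :: l)).headI) :: (chop (x :: l)).tail := by
  intro l
  induction l with
  | nil => intro pre x; simp [finalize, chop]
  | cons d t ih =>
    intro pre x
    rw [List.foldl_cons, stepF_app]
    by_cases hxd : x ≤ d
    · rw [if_pos hxd, ih]
      cases hc : chop (d :: t) with
      | nil => exact absurd hc (chop_cons_ne_nil d t)
      | cons g gs =>
        simp [chop, chopAux, hc, if_neg (not_lt.mpr hxd)]
    · rw [if_neg hxd, fold_shift]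
      have h2 := ih [] d
      simp only [List.nil_append] at h2
      rw [h2]
      cases hc : chop (d :: t) with
      | nil => exact absurd hc (chop_cons_ne_nil d t)
      | cons g gs =>
        simp [chop, chopAux, hc, if_pos (lt_of_not_ge hxd)]

lemma a_eq_chop (dates : List Int) : split_dates_by_month dates = chop dates := by
  cases dates with
  | nil => rfl
  | cons d t =>
    show finalize ((d :: t).foldl stepF ([], [])) = chop (d :: t)
    rw [List.foldl_cons]
    have hst : stepF ([], []) d = ([], ([] : List Int) ++ [d]) := rfl
    rw [hst, fold_chop]
    cases hc : chop (d :: t) with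
    | nil => exact absurd hc (chop_cons_ne_nil d t)
    | cons g gs => simp

-- ===== B-side proof helpers =====
def brks (l : List Int) : List Int :=
  (PySem.List.pyRange 1 (PySem.List.len l)).filter
    (fun i => decide (PySem.List.pyGetD l i 0 < PySem.List.pyGetD l (i - 1) 0))

def slices (l : List Int) (bounds : List Int) : List (List Int) :=
  (bounds.zip bounds.tail).map (fun se => PySem.List.slice l (some se.1) (some se.2))

lemma alt_nonempty_eq (l : List Int) (h : l ≠ []) :
    split_dates_by_month_alt l = slices l (0 :: (brks l ++ [PySem.List.len l])) := by
  have hne : l.isEmpty = false := by simp [h]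
  unfold split_dates_by_month_alt brks slices
  rw [if_neg (by simp [hne])]

lemma slices_nil (l : List Int) (a : Int) : slices l [a] = [] := rfl

lemma slices_cons (l : List Int) (a b : Int) (t : List Int) :
    slices l (a :: b :: t) = PySem.List.slice l (some a) (some b) :: slices l (b :: t) := rfl

lemma pyGetD_cons_shift (x c : Int) (l : List Int) (i : Int) (h : 0 ≤ i) :
    PySem.List.pyGetD (x :: l) (i + 1) c = PySem.List.pyGetD l i c := by
  unfold PySem.List.pyGetD
  rw [PySem.List.pyGet?_of_nonneg _ (by omega), PySem.List.pyGet?_of_nonneg _ h]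
  rw [show (i + 1).toNat = i.toNat + 1 by omega]
  simp

lemma pyRange_shift (a b : Int) :
    PySem.List.pyRange (a + 1) (b + 1) = (PySem.List.pyRange a b).map (· + 1) := by
  rw [PySem.List.pyRange_one, PySem.List.pyRange_one, List.map_map]
  rw [show b + 1 - (a + 1) = b - a by ring]
  apply List.map_congr_left
  intro k _
  simp [Function.comp]
  omega

lemma brks_nonneg (l : List Int) : ∀ b ∈ brks l, 0 ≤ b := by
  intro b hb
  unfold brks at hb
  have := PySem.List.mem_pyRange_one.mp (List.mem_of_mem_filter hb)
  omega

lemma brks_cons (d r : Int) (rs : List Int) :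
    brks (d :: r :: rs) =
      (if r < d then [1] else []) ++ (brks (r :: rs)).map (· + 1) := by
  have hlen : PySem.List.len (d :: r :: rs) = PySem.List.len (r :: rs) + 1 := by
    simp [PySem.List.len]
  unfold brks
  rw [hlen]
  have hN : (1 : Int) ≤ PySem.List.len (r :: rs) := by simp [PySem.List.len]
  rw [PySem.List.pyRange_one_cons (by omega), pyRange_shift 1 (PySem.List.len (r :: rs))]
  rw [List.filter_cons, List.filter_map]
  have h1 : PySem.List.pyGetD (d :: r :: rs) 1 0 = r := by
    have := pyGetD_cons_shift d 0 (r :: rs) 0 le_rfl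
    norm_num at this
    exact this
  have hcong :
      List.filter ((fun i => decide (PySem.List.pyGetD (d :: r :: rs) i 0 <
          PySem.List.pyGetD (d :: r :: rs) (i - 1) 0)) ∘ (· + 1))
        (PySem.List.pyRange 1 (PySem.List.len (r :: rs))) =
      List.filter (fun i => decide (PySem.List.pyGetD (r :: rs) i 0 <
          PySem.List.pyGetD (r :: rs) (i - 1) 0))
        (PySem.List.pyRange 1 (PySem.List.len (r :: rs))) := by
    apply List.filter_congr
    intro i hi
    have hi1 : 1 ≤ i := (PySem.List.mem_pyRange_one.mp hi).1
    simp only [Function.comp]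
    have e1 : PySem.List.pyGetD (d :: r :: rs) (i + 1) 0 = PySem.List.pyGetD (r :: rs) i 0 :=
      pyGetD_cons_shift _ _ _ _ (by omega)
    have e2 : PySem.List.pyGetD (d :: r :: rs) (i + 1 - 1) 0 =
        PySem.List.pyGetD (r :: rs) (i - 1) 0 := by
      rw [show i + 1 - 1 = (i - 1) + 1 by ring]
      exact pyGetD_cons_shift _ _ _ _ (by omega)
    rw [e1, e2]
  rw [hcong]
  by_cases hrd : r < d
  · rw [if_pos (by simp [h1]; omega), if_pos hrd]
    rfl
  · rw [if_neg (by simp [h1]; omega), if_neg hrd]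
    rfl

lemma slice_cons_succ (x : Int) (l : List Int) (s e : Int) (hs : 0 ≤ s) (he : 0 ≤ e) :
    PySem.List.slice (x :: l) (some (s + 1)) (some (e + 1)) =
      PySem.List.slice l (some s) (some e) := by
  rw [PySem.List.slice_toNat _ (by omega) (by omega), PySem.List.slice_toNat _ hs he]
  rw [show (s + 1).toNat = s.toNat + 1 by omega, show (e + 1).toNat = e.toNat + 1 by omega]
  simp

lemma slice_cons_zero (x : Int) (l : List Int) (e : Int) (he : 0 ≤ e) :
    PySem.List.slice (x :: l) (some 0) (some (e + 1)) =
      x :: PySem.List.slice l (some 0) (some e) := by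
  rw [PySem.List.slice_toNat _ le_rfl (by omega), PySem.List.slice_toNat _ le_rfl he]
  rw [show (e + 1).toNat = e.toNat + 1 by omega]
  simp

lemma slices_shift (x : Int) (l : List Int) (bounds : List Int)
    (hb : ∀ b ∈ bounds, 0 ≤ b) :
    slices (x :: l) (bounds.map (· + 1)) = slices l bounds := by
  unfold slices
  rw [show (bounds.map (· + 1)).tail = bounds.tail.map (· + 1) from by cases bounds <;> rfl]
  rw [List.zip_map, List.map_map]
  apply List.map_congr_left
  rintro ⟨s, e⟩ hse
  obtain ⟨h1, h2⟩ := List.of_mem_zip hse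
  exact slice_cons_succ x l s e (hb _ h1) (hb _ (List.mem_of_mem_tail h2))

lemma b_eq_chop (dates : List Int) : split_dates_by_month_alt dates = chop dates := by
  induction dates with
  | nil => rfl
  | cons d t ih =>
    cases t with
    | nil =>
      rw [alt_nonempty_eq _ (by simp)]
      have hb : brks [d] = [] := by
        unfold brks
        rw [PySem.List.pyRange_one_eq_nil (by simp [PySem.List.len])]
        rfl
      rw [hb]
      have hl : PySem.List.len [d] = 1 := by simp [PySem.List.len]
      rw [hl]
      show slices [d] [0, 1] = chop [d]
      rw [slices_cons, slices_nil]
      rw [PySem.List.slice_toNat _ le_rfl (by norm_num)]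
      simp [chop]
    | cons r rs =>
      set N : Int := PySem.List.len (r :: rs) with hNdef
      have hN : (1 : Int) ≤ N := by simp [hNdef, PySem.List.len]
      have hlen : PySem.List.len (d :: r :: rs) = N + 1 := by
        simp [hNdef, PySem.List.len]
      rw [alt_nonempty_eq _ (by simp), brks_cons, hlen]
      have hbnd : ∀ b ∈ (0 : Int) :: (brks (r :: rs) ++ [N]), 0 ≤ b := by
        intro b hb
        rcases List.mem_cons.mp hb with h | h
        · omega
        · rcases List.mem_append.mp h with h' | h'
          · exact brks_nonneg _ _ h'
          · simp at h'; omega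
      by_cases hrd : r < d
      · rw [if_pos hrd]
        have hsh : ((([1] : List Int) ++ (brks (r :: rs)).map (· + 1)) ++ [N + 1]) =
            1 :: ((brks (r :: rs) ++ [N]).map (· + 1)) := by simp
        rw [hsh, show ((0 : Int) :: 1 :: (brks (r :: rs) ++ [N]).map (· + 1)) =
          0 :: ((0 : Int) :: (brks (r :: rs) ++ [N])).map (· + 1) from by norm_num]
        rw [show (((0 : Int) :: (brks (r :: rs) ++ [N])).map (· + 1)) =
          (0 + 1) :: ((brks (r :: rs) ++ [N]).map (· + 1)) from rfl]
        rw [slices_cons]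
        rw [show ((0 : Int) + 1) :: ((brks (r :: rs) ++ [N]).map (· + 1)) =
          (((0 : Int) :: (brks (r :: rs) ++ [N])).map (· + 1)) from rfl]
        rw [slices_shift d (r :: rs) _ hbnd]
        rw [← alt_nonempty_eq _ (by simp), ih]
        have hsl : PySem.List.slice (d :: r :: rs) (some 0) (some (0 + 1)) = [d] := by
          rw [PySem.List.slice_toNat _ le_rfl (by norm_num)]
          simp
        rw [hsl]
        cases hc : chop (r :: rs) with
        | nil => exact absurd hc (chop_cons_ne_nil r rs)
        | cons g gs => simp [chop, chopAux, hc, if_pos hrd]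
      · rw [if_neg hrd]
        have hsh : ((([] : List Int) ++ (brks (r :: rs)).map (· + 1)) ++ [N + 1]) =
            (brks (r :: rs) ++ [N]).map (· + 1) := by simp
        rw [hsh]
        obtain ⟨e1, Bt, hB⟩ : ∃ e1 Bt, brks (r :: rs) ++ [N] = e1 :: Bt := by
          cases h : brks (r :: rs) with
          | nil => exact ⟨N, [], by simp⟩
          | cons a t' => exact ⟨a, t' ++ [N], by simp⟩
        have he1 : 0 ≤ e1 := hbnd e1 (by rw [hB]; simp)
        have hBt : ∀ b ∈ e1 :: Bt, 0 ≤ b := by rw [← hB]; intro b hb; exact hbnd b (by simp [hb])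
        have hch : chop (r :: rs) =
            PySem.List.slice (r :: rs) (some 0) (some e1) :: slices (r :: rs) (e1 :: Bt) := by
          rw [← ih, alt_nonempty_eq _ (by simp), ← hNdef, hB, slices_cons]
        rw [hB]
        rw [show ((e1 :: Bt).map (· + 1)) = (e1 + 1) :: Bt.map (· + 1) from rfl]
        rw [slices_cons]
        rw [show ((e1 + 1) :: Bt.map (· + 1)) = (e1 :: Bt).map (· + 1) from rfl]
        rw [slices_shift d (r :: rs) _ hBt]
        rw [slice_cons_zero d (r :: rs) e1 he1]
        show _ = chop (d :: r :: rs)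
        rw [show chop (d :: r :: rs) = chopAux d r (chop (r :: rs)) from rfl, hch]
        simp [chopAux, hrd]

-- ===== VERDICT (by name: the statement is the Claim_ definition above) =====
theorem split_dates_by_month_spec : Claim_equal_split_dates_by_month := by
  intro dates _
  unfold Spec_split_dates_by_month
  rw [a_eq_chop, b_eq_chop]
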